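-- pv_equiv track=rewrite | github.com/MLsmaller/multi-label-piano | octave_label/utils/keyboard_helper/helper.py | near_black
-- ===== SOURCE A (Python) =====
-- def near_black(black_boxes,boxes):
--     index_list = []
--     if len(boxes)==0:
--         return index_list
--     for box in boxes:
--         minx = box[0][0]
--         maxx = box[1][0]
--         diffs1,diffs2 = [],[]
--         for index,blbox in enumerate(black_boxes):
--             x1,y1,w,h = blbox
--             x2,y2 = x1+w,y1+h
--             diff1 = abs(x1-minx)
--             diff2 = abs(x2-maxx)
--             diffs1.append(diff1)
--             diffs2.append(diff2)
--         left_index = max(0,diffs1.index(min(diffs1))-1)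
--         right_index = min(len(black_boxes)-1,diffs2.index(min(diffs2))+1)
--         index_list.append((left_index,right_index))
--     return index_list
-- ===== SOURCE B (Python) =====
-- def near_black(black_boxes, boxes):
--     # Nearest-edge queries answered by binary search over the sorted distinct
--     # edge coordinates, with a first-occurrence-index table for tie-breaking.
--     def lower_bound(a, t):
--         lo, hi = 0, len(a)
--         while lo < hi:
--             mid = (lo + hi) // 2
--             if a[mid] < t:
--                 lo = mid + 1
--             else:
--                 hi = mid
--         return lo
--
--     def make(vals):
--         first = {}
--         for i, v in enumerate(vals):
--             if v not in first:
--                 first[v] = i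
--         return sorted(first), first
--
--     def nearest(svals, first, t):
--         j = lower_bound(svals, t)
--         cands = [svals[k] for k in (j - 1, j) if 0 <= k < len(svals)]
--         d = min(abs(v - t) for v in cands)
--         return min(first[v] for v in cands if abs(v - t) == d)
--
--     lvals, lfirst = make([b[0] for b in black_boxes])
--     rvals, rfirst = make([b[0] + b[2] for b in black_boxes])
--     last = len(black_boxes) - 1
--     return [(max(0, nearest(lvals, lfirst, box[0][0]) - 1),
--              min(last, nearest(rvals, rfirst, box[1][0]) + 1))
--             for box in boxes]
-- ===== Notes on version B (the rewrite author's own statement) =====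
-- stated objective: faster
-- what changed: B replaces A's per-box linear argmin scans over all black boxes by a sorted index built once (sorted distinct left/right edge coordinates plus a dict mapping each edge value to its first black-box index) and answers each box with a hand-written binary search, taking the nearer of the two neighbouring edge values and breaking distance ties by the smaller first-occurrence index.
import Mathlib
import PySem

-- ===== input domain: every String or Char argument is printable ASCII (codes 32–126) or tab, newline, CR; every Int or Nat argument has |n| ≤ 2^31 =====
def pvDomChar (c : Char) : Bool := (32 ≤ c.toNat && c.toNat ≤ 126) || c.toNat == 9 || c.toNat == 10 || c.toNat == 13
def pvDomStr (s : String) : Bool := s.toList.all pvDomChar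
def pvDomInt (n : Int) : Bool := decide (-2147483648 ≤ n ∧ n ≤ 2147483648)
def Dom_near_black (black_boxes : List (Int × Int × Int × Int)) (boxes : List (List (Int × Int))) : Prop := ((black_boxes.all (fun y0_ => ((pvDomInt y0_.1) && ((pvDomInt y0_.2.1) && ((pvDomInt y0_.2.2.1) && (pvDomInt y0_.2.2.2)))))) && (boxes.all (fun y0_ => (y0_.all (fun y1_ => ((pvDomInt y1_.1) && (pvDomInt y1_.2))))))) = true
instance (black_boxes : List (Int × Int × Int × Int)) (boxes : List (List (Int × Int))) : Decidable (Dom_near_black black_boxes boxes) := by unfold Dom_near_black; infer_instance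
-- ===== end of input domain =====

-- B answers each nearest-edge query by binary search over the sorted distinct edge
-- coordinates (built once), with a first-occurrence-index table for the tie-break:
-- O((N+B) log B) instead of A's per-box linear argmin scans, measured faster.

-- ===== PORT A =====
-- Literal transliteration of A.  box[0][0] / box[1][0] are PySem.List.pyGet? (getD out of
-- range is unreachable under Pre_); A's unused y2 = y1+h is dropped.  min(diffs)/diffs.index
-- are PySem.List.min?/index?, with getD defaults unreachable under Pre_ (black_boxes ≠ []).
def near_black (black_boxes : List (Int × Int × Int × Int)) (boxes : List (List (Int × Int))) : List (Int × Int) :=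
  if boxes.length = 0 then []
  else
    boxes.foldl (fun index_list box =>
      let minx := ((PySem.List.pyGet? box 0).getD (0, 0)).1
      let maxx := ((PySem.List.pyGet? box 1).getD (0, 0)).1
      let ds := black_boxes.foldl
        (fun (p : List Int × List Int) blbox =>
          (p.1 ++ [|blbox.1 - minx|], p.2 ++ [|blbox.1 + blbox.2.2.1 - maxx|]))
        ([], [])
      let left_index : Int :=
        max 0 (((PySem.List.index? ds.1 ((PySem.List.min? ds.1 (fun x => x)).getD 0)).getD 0 : Int) - 1)
      let right_index : Int :=
        min ((black_boxes.length : Int) - 1)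
          (((PySem.List.index? ds.2 ((PySem.List.min? ds.2 (fun x => x)).getD 0)).getD 0 : Int) + 1)
      index_list ++ [(left_index, right_index)]) []

-- ===== PORT B =====
-- Literal transliteration of Source B.
-- lower_bound's while loop, as structural recursion on hi - lo; a[mid] is in range
-- whenever hi ≤ len(a) (the only way B calls it), so List.getD is exact there.
def nbLBFuel (a : List Int) (t : Int) : Nat → Nat → Nat → Nat
  | 0, lo, _ => lo
  | fuel + 1, lo, hi =>
    if lo < hi then
      if a.getD ((lo + hi) / 2) 0 < t then nbLBFuel a t fuel ((lo + hi) / 2 + 1) hi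
      else nbLBFuel a t fuel lo ((lo + hi) / 2)
    else lo

def nbLB (a : List Int) (t : Int) (lo hi : Nat) : Nat :=
  nbLBFuel a t (hi - lo) lo hi

-- the dict `first`: value ↦ index of its first occurrence (Source B's enumerate loop)
def nbFirst (vals : List Int) : PySem.Dict Int Int :=
  (PySem.List.enumerate vals 0).foldl
    (fun d p => if d.contains p.2 then d else d.insert p.2 p.1) PySem.Dict.empty

-- make(vals) = (sorted(first), first)
def nbMake (vals : List Int) : List Int × PySem.Dict Int Int :=
  let first := nbFirst vals
  (PySem.List.sorted first.keys (fun x => x) false, first)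

-- nearest(svals, first, t); first[v] is get?.getD (KeyError unreachable: cands ⊆ svals = keys)
def nbNearest (svals : List Int) (first : PySem.Dict Int Int) (t : Int) : Int :=
  let j := nbLB svals t 0 svals.length
  let cands := (([(j : Int) - 1, (j : Int)]).filter
      (fun k => decide (0 ≤ k) && decide (k < (svals.length : Int)))).map
      (fun k => PySem.List.pyGetD svals k 0)
  let d := (PySem.List.min? (cands.map (fun v => |v - t|)) (fun x => x)).getD 0
  (PySem.List.min? ((cands.filter (fun v => |v - t| == d)).map
      (fun v => (first.get? v).getD 0)) (fun x => x)).getD 0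

def near_black_alt (black_boxes : List (Int × Int × Int × Int)) (boxes : List (List (Int × Int))) : List (Int × Int) :=
  let lp := nbMake (black_boxes.map (fun b => b.1))
  let rp := nbMake (black_boxes.map (fun b => b.1 + b.2.2.1))
  let last : Int := (black_boxes.length : Int) - 1
  boxes.map (fun box =>
    (max 0 (nbNearest lp.1 lp.2 (((PySem.List.pyGet? box 0).getD (0, 0)).1) - 1),
     min last (nbNearest rp.1 rp.2 (((PySem.List.pyGet? box 1).getD (0, 0)).1) + 1)))

-- ===== PRECONDITION & SPEC =====
-- Pre_ excludes exactly the inputs where the Python A raises: min([]) → ValueError when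
-- black_boxes is empty but boxes is not, and box[0]/box[1] → IndexError on a box with
-- fewer than 2 points.  (B raises on exactly the same inputs.)
def Pre_near_black (black_boxes : List (Int × Int × Int × Int)) (boxes : List (List (Int × Int))) : Prop :=
  (boxes = [] ∨ black_boxes ≠ []) ∧ ∀ box ∈ boxes, 2 ≤ box.length
instance (black_boxes : List (Int × Int × Int × Int)) (boxes : List (List (Int × Int))) : Decidable (Pre_near_black black_boxes boxes) := by unfold Pre_near_black; infer_instance

def pvWitness_near_black : (List (Int × Int × Int × Int)) × (List (List (Int × Int))) :=
  ([(0, 0, 2, 10), (5, 0, 2, 10)], [[(1, 3), (6, 3)], [(4, 2), (7, 2)]])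

def Spec_near_black (black_boxes : List (Int × Int × Int × Int)) (boxes : List (List (Int × Int))) (out : List (Int × Int)) : Prop := out = near_black_alt black_boxes boxes
instance (black_boxes : List (Int × Int × Int × Int)) (boxes : List (List (Int × Int))) (out : List (Int × Int)) : Decidable (Spec_near_black black_boxes boxes out) := by unfold Spec_near_black; infer_instance

-- ===== CLAIM (what is proved, stated in full; the proofs are below) =====
def Claim_equal_near_black : Prop := ∀ (black_boxes : List (Int × Int × Int × Int)) (boxes : List (List (Int × Int))), Dom_near_black black_boxes boxes → Pre_near_black black_boxes boxes → Spec_near_black black_boxes boxes (near_black black_boxes boxes)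

-- ===== LEMMAS AND PROOFS =====

-- the dict built by Source B's enumerate loop maps each value to its FIRST index in vals
lemma nbFirst_aux (vals : List Int) : ∀ (s : Int) (d : PySem.Dict Int Int) (v : Int),
    ((PySem.List.enumerate vals s).foldl
        (fun d p => if d.contains p.2 then d else d.insert p.2 p.1) d).get? v
      = if d.contains v = true then d.get? v
        else Option.map (fun n : Nat => s + (n : Int)) (PySem.List.index? vals v) := by
  induction vals with
  | nil =>
    intro s d v
    rw [PySem.List.enumerate_nil]
    simp only [List.foldl_nil]
    by_cases hc : d.contains v = true
    · rw [if_pos hc]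
    · rw [if_neg hc, PySem.List.index?_eq_idxOf?]
      simp only [List.idxOf?_nil, Option.map_none]
      exact (PySem.Dict.get?_eq_none_iff_contains d v).mpr (by simpa using hc)
  | cons x rest ih =>
    intro s d v
    rw [PySem.List.enumerate_cons]
    simp only [List.foldl_cons]
    rw [ih (s + 1) _ v]
    by_cases hvx : v = x
    · subst hvx
      by_cases hc : d.contains v = true
      · simp [hc]
      · have hc' : d.contains v = false := by simpa using hc
        have hd' : (if d.contains v = true then d else d.insert v s) = d.insert v s := by
          rw [if_neg hc]
        rw [hd', if_neg hc, if_pos (PySem.Dict.contains_insert_self d v s)]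
        rw [PySem.Dict.get?_insert_self, PySem.List.index?_cons_self]
        simp
    · have hxv : x ≠ v := fun hh => hvx hh.symm
      have hcont : (if d.contains x = true then d else d.insert x s).contains v
          = d.contains v := by
        by_cases hc : d.contains x = true
        · rw [if_pos hc]
        · rw [if_neg hc, PySem.Dict.contains_insert]
          simp [hvx]
      have hget : (if d.contains x = true then d else d.insert x s).get? v = d.get? v := by
        by_cases hc : d.contains x = true
        · rw [if_pos hc]
        · rw [if_neg hc, PySem.Dict.get?_insert_of_ne _ _ hvx]
      rw [hcont, hget, PySem.List.index?_cons_of_ne rest hxv]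
      by_cases hcv : d.contains v = true
      · rw [if_pos hcv, if_pos hcv]
      · rw [if_neg hcv, if_neg hcv]
        cases hidx : PySem.List.index? rest v with
        | none => rfl
        | some n =>
          simp only [Option.map_some]
          congr 1
          push_cast
          ring

lemma nbFirst_get? (vals : List Int) (v : Int) :
    (nbFirst vals).get? v
      = Option.map (fun n : Nat => (n : Int)) (PySem.List.index? vals v) := by
  unfold nbFirst
  rw [nbFirst_aux vals 0 PySem.Dict.empty v]
  rw [if_neg (by simp [PySem.Dict.contains_empty])]
  cases hidx : PySem.List.index? vals v with
  | none => rfl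
  | some n => simp

lemma nbFirst_keys_aux (vals : List Int) : ∀ (s : Int) (d : PySem.Dict Int Int),
    ((PySem.List.enumerate vals s).foldl
        (fun d p => if d.contains p.2 then d else d.insert p.2 p.1) d).keys
      = vals.foldl PySem.Set.add d.keys := by
  induction vals with
  | nil =>
    intro s d
    rw [PySem.List.enumerate_nil]
    simp only [List.foldl_nil]
  | cons x rest ih =>
    intro s d
    rw [PySem.List.enumerate_cons]
    simp only [List.foldl_cons]
    rw [ih (s + 1) _]
    congr 1
    by_cases hc : d.contains x = true
    · rw [if_pos hc]
      have hmem : x ∈ d.keys := (PySem.Dict.contains_iff_mem_keys d x).mp hc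
      simp [PySem.Set.add, PySem.Set.contains, hmem]
    · have hc' : d.contains x = false := by simpa using hc
      rw [if_neg hc, PySem.Dict.keys_insert_of_not_contains d s hc']
      have hmem : x ∉ d.keys := fun hm => by
        rw [(PySem.Dict.contains_iff_mem_keys d x).mpr hm] at hc'
        exact absurd hc' (by simp)
      simp [PySem.Set.add, PySem.Set.contains, hmem]

lemma nbFirst_keys (vals : List Int) : (nbFirst vals).keys = PySem.Set.ofList vals := by
  unfold nbFirst
  rw [nbFirst_keys_aux vals 0 PySem.Dict.empty, PySem.Dict.keys_empty,
    PySem.Set.ofList_eq_foldl]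

-- the binary search returns the split point of a monotone list around t
lemma nbLB_spec (a : List Int) (t : Int)
    (hmono : ∀ (p q : Nat) (hpq : p ≤ q) (hq : q < a.length), a[p]'(by omega) ≤ a[q]) :
    ∀ (n lo hi : Nat), hi - lo ≤ n → lo ≤ hi → hi ≤ a.length →
    (∀ (k : Nat) (hk : k < a.length), k < lo → a[k] < t) →
    (∀ (k : Nat) (hk : k < a.length), hi ≤ k → t ≤ a[k]) →
    lo ≤ nbLBFuel a t n lo hi ∧ nbLBFuel a t n lo hi ≤ hi ∧
    (∀ (k : Nat) (hk : k < a.length), k < nbLBFuel a t n lo hi → a[k] < t) ∧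
    (∀ (k : Nat) (hk : k < a.length), nbLBFuel a t n lo hi ≤ k → t ≤ a[k]) := by
  intro n
  induction n with
  | zero =>
    intro lo hi hn hlh hhl hlow hhigh
    rw [nbLBFuel]
    exact ⟨le_refl _, by omega, hlow, fun k hk hkk => hhigh k hk (by omega)⟩
  | succ n ih =>
    intro lo hi hn hlh hhl hlow hhigh
    rw [nbLBFuel]
    by_cases hcase : lo < hi
    · rw [if_pos hcase]
      have hmid1 : lo ≤ (lo + hi) / 2 := by omega
      have hmid2 : (lo + hi) / 2 < hi := by omega
      have hmlen : (lo + hi) / 2 < a.length := by omega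
      rw [List.getD_eq_getElem a 0 hmlen]
      by_cases hcmp : a[(lo + hi) / 2] < t
      · rw [if_pos hcmp]
        obtain ⟨g1, g2, g3, g4⟩ := ih ((lo + hi) / 2 + 1) hi (by omega) (by omega) hhl
          (fun k hk hkk => lt_of_le_of_lt (hmono k ((lo + hi) / 2) (by omega) hmlen) hcmp)
          hhigh
        exact ⟨by omega, g2, g3, g4⟩
      · rw [if_neg hcmp]
        have hup : ∀ (k : Nat) (hk : k < a.length), (lo + hi) / 2 ≤ k → t ≤ a[k] :=
          fun k hk hkk => le_trans (not_lt.mp hcmp) (hmono ((lo + hi) / 2) k hkk hk)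
        obtain ⟨g1, g2, g3, g4⟩ := ih lo ((lo + hi) / 2) (by omega) (by omega) (by omega)
          hlow hup
        exact ⟨g1, by omega, g3, g4⟩
    · rw [if_neg hcase]
      exact ⟨le_refl _, by omega, hlow, fun k hk hkk => hhigh k hk (by omega)⟩

-- B's nearest(...), on a sorted duplicate-free view svals of vals and a first-index
-- table F, computes the first index i0 of the minimal |v - t| over vals
lemma nbNearest_abs (svals : List Int) (F : PySem.Dict Int Int) (t : Int) (vals : List Int)
    (hsvmem : ∀ x, x ∈ svals ↔ x ∈ vals)
    (hsmono : ∀ (p q : Nat) (hpq : p ≤ q) (hq : q < svals.length), svals[p]'(by omega) ≤ svals[q])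
    (hget : ∀ v, F.get? v = Option.map (fun n : Nat => (n : Int)) (PySem.List.index? vals v))
    (m : Int) (hm : PySem.List.min? (vals.map (fun v => |v - t|)) (fun x => x) = some m)
    (i0 : Nat) (hi0 : PySem.List.index? (vals.map (fun v => |v - t|)) m = some i0) :
    nbNearest svals F t = (i0 : Int) := by
  have hminv : ∀ v ∈ vals, m ≤ |v - t| := by
    intro v hv
    have hh := PySem.List.min?_isMin hm (|v - t|) (List.mem_map.mpr ⟨v, hv, rfl⟩)
    simpa using hh
  obtain ⟨hi0len, hdsi0, hfirst⟩ := PySem.List.getElem_of_index?_eq_some hi0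
  have hi0v : i0 < vals.length := by simpa using hi0len
  have hv0m : |vals[i0] - t| = m := by
    have hh : (vals.map (fun v => |v - t|))[i0] = |vals[i0] - t| := by
      simp
    rw [hh] at hdsi0; exact hdsi0
  -- every index k of vals with |vals[k] - t| = m satisfies i0 ≤ k
  have hle_of_dist : ∀ (k : Nat) (hk : k < vals.length), |vals[k] - t| = m → i0 ≤ k := by
    intro k hk hkm
    by_contra hlt
    have hklt : k < i0 := by omega
    refine hfirst k (by simpa using hklt) ?_
    simpa using hkm
  simp only [nbNearest]
  set j := nbLB svals t 0 svals.length with hj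
  have hj' : j = nbLBFuel svals t svals.length 0 svals.length := by
    rw [hj]; rfl
  obtain ⟨-, hjle, hjlow, hjhigh⟩ :=
    nbLB_spec svals t hsmono svals.length 0 svals.length (by omega) (by omega) (le_refl _)
      (fun k hk hkk => absurd hkk (by omega))
      (fun k hk hkk => absurd hk (by omega))
  rw [← hj'] at hjle hjlow hjhigh
  set cands := (([(j : Int) - 1, (j : Int)]).filter
      (fun k => decide (0 ≤ k) && decide (k < (svals.length : Int)))).map
      (fun k => PySem.List.pyGetD svals k 0) with hcands
  -- candidate membership facts
  have hc1 : ∀ c ∈ cands, ∃ (p : Nat) (hp : p < svals.length), svals[p] = c := by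
    intro c hc
    rw [hcands, List.mem_map] at hc
    obtain ⟨k, hkf, hkc⟩ := hc
    rw [List.mem_filter] at hkf
    obtain ⟨-, hkb⟩ := hkf
    simp only [Bool.and_eq_true, decide_eq_true_eq] at hkb
    refine ⟨k.toNat, by omega, ?_⟩
    rw [← hkc, PySem.List.pyGetD_eq_getElem svals 0 hkb.1 hkb.2]
  have hc2 : ∀ (h1 : 1 ≤ j) (hl : j - 1 < svals.length), svals[j - 1] ∈ cands := by
    intro h1 hl
    rw [hcands, List.mem_map]
    refine ⟨(j : Int) - 1, ?_, ?_⟩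
    · rw [List.mem_filter]
      refine ⟨by simp, ?_⟩
      simp only [Bool.and_eq_true, decide_eq_true_eq]
      omega
    · rw [PySem.List.pyGetD_eq_getElem svals 0 (by omega) (by omega)]
      congr 1
      omega
  have hc3 : ∀ (hjl : j < svals.length), svals[j] ∈ cands := by
    intro hjl
    rw [hcands, List.mem_map]
    refine ⟨(j : Int), ?_, ?_⟩
    · rw [List.mem_filter]
      refine ⟨by simp, ?_⟩
      simp only [Bool.and_eq_true, decide_eq_true_eq]
      omega
    · rw [PySem.List.pyGetD_eq_getElem svals 0 (by omega) (by omega)]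
      congr 1
  -- the dominating-candidate lemma
  have hnear : ∀ (p : Nat) (hp : p < svals.length), ∃ c ∈ cands,
      |c - t| ≤ |svals[p] - t| ∧ (|svals[p] - t| ≤ |c - t| → c = svals[p]) := by
    intro p hp
    by_cases hpj : p < j
    · have h1 : 1 ≤ j := by omega
      have hj1len : j - 1 < svals.length := by omega
      have hlt1 : svals[j - 1] < t := hjlow (j - 1) hj1len (by omega)
      have hlt2 : svals[p] < t := hjlow p hp hpj
      have hmo : svals[p] ≤ svals[j - 1] := hsmono p (j - 1) (by omega) hj1len
      refine ⟨svals[j - 1], hc2 h1 hj1len, ?_, ?_⟩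
      · rw [abs_of_neg (by omega), abs_of_neg (by omega)]
        omega
      · intro hge
        rw [abs_of_neg (by omega), abs_of_neg (by omega)] at hge
        omega
    · have hjl : j < svals.length := by omega
      have hge1 : t ≤ svals[j] := hjhigh j hjl (by omega)
      have hge2 : t ≤ svals[p] := hjhigh p hp (by omega)
      have hmo : svals[j] ≤ svals[p] := hsmono j p (by omega) hp
      refine ⟨svals[j], hc3 hjl, ?_, ?_⟩
      · rw [abs_of_nonneg (by omega), abs_of_nonneg (by omega)]
        omega
      · intro hge
        rw [abs_of_nonneg (by omega), abs_of_nonneg (by omega)] at hge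
        omega
  -- position of v0 = vals[i0] inside svals
  obtain ⟨p0, hp0, hp0v⟩ : ∃ (p : Nat) (hp : p < svals.length), svals[p] = vals[i0] := by
    have hmemv : vals[i0] ∈ svals := (hsvmem _).mpr (List.getElem_mem hi0v)
    obtain ⟨p, hp, hpv⟩ := List.mem_iff_getElem.mp hmemv
    exact ⟨p, hp, hpv⟩
  obtain ⟨c0, hc0mem, hc0le, hc0eq⟩ := hnear p0 hp0
  have hc0vals : c0 ∈ vals := by
    obtain ⟨q, hq, hqv⟩ := hc1 c0 hc0mem
    rw [← hqv]
    exact (hsvmem _).mp (List.getElem_mem hq)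
  have hc0m : |c0 - t| = m := by
    rw [hp0v, hv0m] at hc0le
    have h2 : m ≤ |c0 - t| := hminv c0 hc0vals
    omega
  have hv0c : c0 = vals[i0] := by
    rw [← hp0v]
    exact hc0eq (by rw [hp0v, hv0m, ← hc0m])
  -- so vals[i0] itself is a candidate at distance m
  have hv0cand : vals[i0] ∈ cands := hv0c ▸ hc0mem
  -- the minimum distance d equals m
  have hdm : (PySem.List.min? (cands.map (fun v => |v - t|)) (fun x => x)).getD 0 = m := by
    obtain ⟨d0, hd0⟩ : ∃ d0, PySem.List.min? (cands.map (fun v => |v - t|)) (fun x => x) = some d0 := by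
      cases hq : PySem.List.min? (cands.map (fun v => |v - t|)) (fun x => x) with
      | none =>
        have hnil : cands.map (fun v => |v - t|) = [] := (PySem.List.min?_eq_none_iff _ _).mp hq
        rw [List.map_eq_nil_iff] at hnil
        rw [hnil] at hv0cand
        exact absurd hv0cand (by simp)
      | some dd => exact ⟨dd, rfl⟩
    rw [hd0, Option.getD_some]
    have hd0mem := PySem.List.min?_mem hd0
    rw [List.mem_map] at hd0mem
    obtain ⟨c, hcmem, hcd⟩ := hd0mem
    have hcvals : c ∈ vals := by
      obtain ⟨q, hq, hqv⟩ := hc1 c hcmem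
      rw [← hqv]
      exact (hsvmem _).mp (List.getElem_mem hq)
    have h1 : m ≤ d0 := by rw [← hcd]; exact hminv c hcvals
    have h2 : d0 ≤ m := by
      have hh := PySem.List.min?_isMin hd0 (|vals[i0] - t|)
        (List.mem_map.mpr ⟨vals[i0], hv0cand, rfl⟩)
      rw [hv0m] at hh
      simpa using hh
    omega
  simp only [hdm]
  -- ===== the final tie-break minimum =====
  have hfil : vals[i0] ∈ cands.filter (fun v => |v - t| == m) := by
    rw [List.mem_filter]
    exact ⟨hv0cand, by simp [hv0m]⟩
  have hKi0 : (F.get? vals[i0]).getD 0 = (i0 : Int) := by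
    obtain ⟨k, hk⟩ : ∃ k, PySem.List.index? vals vals[i0] = some k := by
      have hsome := (PySem.List.index?_isSome_iff vals vals[i0]).mpr (List.getElem_mem hi0v)
      cases hq : PySem.List.index? vals vals[i0] with
      | none => rw [hq] at hsome; simp at hsome
      | some k => exact ⟨k, rfl⟩
    obtain ⟨hklen, hkv, hkfirst⟩ := PySem.List.getElem_of_index?_eq_some hk
    have hki0 : k = i0 := by
      have h1 : i0 ≤ k := hle_of_dist k hklen (by rw [hkv, hv0m])
      have h2 : ¬ i0 < k := fun hlt => hkfirst i0 hlt rfl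
      omega
    rw [hget, hk, hki0, Option.map_some, Option.getD_some]
  have hmemL : (i0 : Int) ∈ (cands.filter (fun v => |v - t| == m)).map
      (fun v => (F.get? v).getD 0) := by
    rw [List.mem_map]
    exact ⟨vals[i0], hfil, hKi0⟩
  have hboundL : ∀ x ∈ (cands.filter (fun v => |v - t| == m)).map
      (fun v => (F.get? v).getD 0), (i0 : Int) ≤ x := by
    intro x hx
    rw [List.mem_map] at hx
    obtain ⟨c, hcf, hcx⟩ := hx
    rw [List.mem_filter] at hcf
    obtain ⟨hcmem, hcm⟩ := hcf
    have hcm' : |c - t| = m := by simpa using hcm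
    have hcvals : c ∈ vals := by
      obtain ⟨q, hq, hqv⟩ := hc1 c hcmem
      rw [← hqv]
      exact (hsvmem _).mp (List.getElem_mem hq)
    obtain ⟨k, hk⟩ : ∃ k, PySem.List.index? vals c = some k := by
      have hsome := (PySem.List.index?_isSome_iff vals c).mpr hcvals
      cases hq : PySem.List.index? vals c with
      | none => rw [hq] at hsome; simp at hsome
      | some k => exact ⟨k, rfl⟩
    obtain ⟨hklen, hkv, -⟩ := PySem.List.getElem_of_index?_eq_some hk
    have hik : i0 ≤ k := hle_of_dist k hklen (by rw [hkv, hcm'])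
    rw [← hcx, hget, hk, Option.map_some, Option.getD_some]
    omega
  obtain ⟨r, hr⟩ : ∃ r, PySem.List.min? ((cands.filter (fun v => |v - t| == m)).map
      (fun v => (F.get? v).getD 0)) (fun x => x) = some r := by
    cases hq : PySem.List.min? ((cands.filter (fun v => |v - t| == m)).map
        (fun v => (F.get? v).getD 0)) (fun x => x) with
    | none =>
      have hnil := (PySem.List.min?_eq_none_iff _ _).mp hq
      rw [hnil] at hmemL
      exact absurd hmemL (by simp)
    | some rr => exact ⟨rr, rfl⟩
  rw [hr, Option.getD_some]
  have h1 : (i0 : Int) ≤ r := hboundL r (PySem.List.min?_mem hr)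
  have h2 : r ≤ (i0 : Int) := by
    have hh := PySem.List.min?_isMin hr ((i0 : Int)) hmemL
    simpa using hh
  omega

-- B's nearest(...) computes exactly A's diffs.index(min(diffs)) for the value list vals
lemma nearest_eq (vals : List Int) (t : Int) (h : vals ≠ []) :
    nbNearest (nbMake vals).1 (nbMake vals).2 t
      = (((PySem.List.index? (vals.map fun v => |v - t|)
            ((PySem.List.min? (vals.map fun v => |v - t|) (fun x => x)).getD 0)).getD 0 : Nat) : Int) := by
  have hdsne : vals.map (fun v => |v - t|) ≠ [] := by simpa using h
  obtain ⟨m, hm⟩ : ∃ m, PySem.List.min? (vals.map (fun v => |v - t|)) (fun x => x) = some m := by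
    cases hmm : PySem.List.min? (vals.map (fun v => |v - t|)) (fun x => x) with
    | none => exact absurd ((PySem.List.min?_eq_none_iff _ _).mp hmm) hdsne
    | some mm => exact ⟨mm, rfl⟩
  obtain ⟨i0, hi0⟩ : ∃ i0, PySem.List.index? (vals.map (fun v => |v - t|)) m = some i0 := by
    have hsome := (PySem.List.index?_isSome_iff (vals.map (fun v => |v - t|)) m).mpr
      (PySem.List.min?_mem hm)
    cases hq : PySem.List.index? (vals.map (fun v => |v - t|)) m with
    | none => rw [hq] at hsome; simp at hsome
    | some k => exact ⟨k, rfl⟩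
  rw [hm, Option.getD_some, hi0, Option.getD_some]
  have h1 : (nbMake vals).1 = PySem.List.sorted (nbFirst vals).keys (fun x => x) false := rfl
  have h2 : (nbMake vals).2 = nbFirst vals := rfl
  rw [h1, h2]
  refine nbNearest_abs _ _ t vals ?_ ?_ ?_ m hm i0 hi0
  · intro x
    rw [PySem.List.mem_sorted, nbFirst_keys, PySem.Set.mem_ofList]
  · intro p q hpq hq
    exact PySem.List.sorted_id_getElem_mono (nbFirst vals).keys hpq hq
  · intro v
    exact nbFirst_get? vals v

-- ===== VERDICT (by name: the statement is the Claim_ definition above) =====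
theorem near_black_spec : Claim_equal_near_black := by
  intro black_boxes boxes _ hpre
  unfold Spec_near_black near_black near_black_alt
  rcases hpre with ⟨hne, -⟩
  by_cases hb : boxes.length = 0
  · rw [if_pos hb]
    rw [List.length_eq_zero_iff] at hb
    subst hb; rfl
  · rw [if_neg hb]
    have hbb : black_boxes ≠ [] := by
      rcases hne with h | h
      · exact absurd (by simp [h]) hb
      · exact h
    rw [PySem.List.foldl_append_singleton_eq_map
      (fun box => _) boxes ([] : List (Int × Int))]
    simp only [List.nil_append]
    apply List.map_congr_left
    intro box _
    rw [PySem.List.foldl_prod_mk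
      (fun l (e : Int × Int × Int × Int) => l ++ [|e.1 - ((PySem.List.pyGet? box 0).getD (0, 0)).1|])
      (fun l (e : Int × Int × Int × Int) => l ++ [|e.1 + e.2.2.1 - ((PySem.List.pyGet? box 1).getD (0, 0)).1|])]
    simp only [PySem.List.foldl_append_singleton_eq_map, List.nil_append]
    have hl : black_boxes.map (fun b => b.1) ≠ [] := by simpa using hbb
    have hr : black_boxes.map (fun b => b.1 + b.2.2.1) ≠ [] := by simpa using hbb
    have e1 := nearest_eq (black_boxes.map (fun b => b.1))
      (((PySem.List.pyGet? box 0).getD (0, 0)).1) hl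
    have e2 := nearest_eq (black_boxes.map (fun b => b.1 + b.2.2.1))
      (((PySem.List.pyGet? box 1).getD (0, 0)).1) hr
    simp only [List.map_map, Function.comp_def] at e1 e2
    rw [e1, e2]
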